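-- pv_equiv track=rewrite | github.com/vidit1248/custom_chatbot_with_pdf | app.py | divide_string_into_5
-- ===== SOURCE A (Python) =====
-- def divide_string_into_5(input_string, arrayLength):
--     if len(input_string) < arrayLength:
--         arrayLength = 1 #raise ValueError("Input string is too short to create an array of size 5")
--
--     # Calculate the approximate length of each substring
--     substring_length = len(input_string) // arrayLength
--     remaining_chars = len(input_string) % arrayLength
--
--     substrings = []
--     start_index = 0
--
--     # Divide the string into 5 parts
--     for i in range(arrayLength):
--         end_index = start_index + substring_length + (1 if i < remaining_chars else 0)
--         substrings.append(input_string[start_index:end_index])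
--         start_index = end_index
--
--     return substrings
-- ===== SOURCE B (Python) =====
-- def divide_string_into_5(input_string, arrayLength):
--     if len(input_string) < arrayLength:
--         arrayLength = 1
--     # peel parts off the END: the last of k remaining parts of a prefix of
--     # length `end` has length end // k; build the list backwards, then reverse
--     parts = []
--     end = len(input_string)
--     k = arrayLength
--     while k > 0:
--         step = end // k
--         parts.append(input_string[end - step:end])
--         end -= step
--         k -= 1
--     return list(reversed(parts))
-- ===== Notes on version B (the rewrite author's own statement) =====
-- stated objective: alternative
-- what changed: Instead of A's forward loop distributing a precomputed quotient/remainder with a conditional extra char and a running start index, B peels parts off the END of the string: each step takes the last of the k remaining parts with length end//k (a fresh floor division of the remaining prefix, no remainder bookkeeping), building the result backwards and reversing it.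
import Mathlib
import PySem

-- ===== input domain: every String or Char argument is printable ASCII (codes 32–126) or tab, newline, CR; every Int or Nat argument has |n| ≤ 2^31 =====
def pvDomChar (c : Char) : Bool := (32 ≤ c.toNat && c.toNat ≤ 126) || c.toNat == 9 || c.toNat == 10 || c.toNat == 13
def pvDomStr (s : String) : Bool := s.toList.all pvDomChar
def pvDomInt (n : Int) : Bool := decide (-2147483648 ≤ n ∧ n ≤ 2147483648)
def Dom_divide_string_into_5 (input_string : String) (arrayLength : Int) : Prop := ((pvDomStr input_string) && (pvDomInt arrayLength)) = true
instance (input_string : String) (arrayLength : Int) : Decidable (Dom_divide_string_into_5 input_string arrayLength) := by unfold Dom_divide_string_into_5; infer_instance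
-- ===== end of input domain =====

-- B replaces A's forward loop (precomputed quotient/remainder, conditional extra char, running start
-- index) by peeling parts off the END of the string with a fresh floor division of the remaining
-- prefix by the remaining part count, building the result backwards and reversing it.

-- ===== PORT A =====
-- one iteration of A's loop: compute end_index, append the slice, carry end_index as the new start_index
def stepA (cs : List Char) (q r : Int) (st : List String × Int) (i : Int) : List String × Int :=
  let e := st.2 + q + (if i < r then 1 else 0)
  (st.1 ++ [String.ofList (PySem.List.slice cs (some st.2) (some e))], e)

def divide_string_into_5 (input_string : String) (arrayLength : Int) : List String :=
  let n : Int := PySem.Str.len input_string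
  let k : Int := if n < arrayLength then 1 else arrayLength
  let q : Int := PySem.Int.floordiv n k
  let r : Int := PySem.Int.mod n k
  ((PySem.List.pyRange 0 k 1).foldl (stepA input_string.toList q r) ([], 0)).1

-- ===== PORT B =====
-- B's while loop: peel the last of k remaining parts (length end // k) off the prefix of length end
def loopB (cs : List Char) (e k : Int) (acc : List String) : List String :=
  if k ≤ 0 then acc
  else
    let step : Int := PySem.Int.floordiv e k
    loopB cs (e - step) (k - 1)
      (acc ++ [String.ofList (PySem.List.slice cs (some (e - step)) (some e))])
termination_by k.toNat
decreasing_by omega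

def divide_string_into_5_alt (input_string : String) (arrayLength : Int) : List String :=
  let k : Int := if PySem.Str.len input_string < arrayLength then 1 else arrayLength
  (loopB input_string.toList (PySem.Str.len input_string) k []).reverse

-- ===== PRECONDITION & SPEC =====
-- Pre_ excludes only arrayLength = 0, where the Python A raises ZeroDivisionError.
def Pre_divide_string_into_5 (input_string : String) (arrayLength : Int) : Prop := arrayLength ≠ 0
instance (input_string : String) (arrayLength : Int) : Decidable (Pre_divide_string_into_5 input_string arrayLength) := by unfold Pre_divide_string_into_5; infer_instance
def pvWitness_divide_string_into_5 : String × Int := ("hello", 2)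

def Spec_divide_string_into_5 (input_string : String) (arrayLength : Int) (out : List String) : Prop := out = divide_string_into_5_alt input_string arrayLength
instance (input_string : String) (arrayLength : Int) (out : List String) : Decidable (Spec_divide_string_into_5 input_string arrayLength out) := by unfold Spec_divide_string_into_5; infer_instance

-- ===== CLAIM (what is proved, stated in full; the proofs are below) =====
def Claim_equal_divide_string_into_5 : Prop := ∀ (input_string : String) (arrayLength : Int), Dom_divide_string_into_5 input_string arrayLength → Pre_divide_string_into_5 input_string arrayLength → Spec_divide_string_into_5 input_string arrayLength (divide_string_into_5 input_string arrayLength)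

-- ===== LEMMAS AND PROOFS =====

-- the closed-form part i, shared target of both ports' characterisations (proof-only helper)
def partC (cs : List Char) (q r i : Int) : String :=
  String.ofList (PySem.List.slice cs (some (i * q + min i r)) (some ((i + 1) * q + min (i + 1) r)))

-- mod bounds for a positive divisor
lemma mod_bounds (n k : Int) (hk : 0 < k) :
    0 ≤ PySem.Int.mod n k ∧ PySem.Int.mod n k < k := by
  rw [PySem.Int.mod_eq_emod_of_pos hk]
  exact ⟨Int.emod_nonneg n (by omega), Int.emod_lt_of_pos n hk⟩

-- quotient is nonnegative for nonnegative dividend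
lemma fdiv_nonneg' (n k : Int) (hn : 0 ≤ n) (hk : 0 < k) : 0 ≤ PySem.Int.floordiv n k := by
  have hrep := PySem.Int.floordiv_mul_add_mod n k
  have hb := mod_bounds n k hk
  nlinarith

-- after removing the last part (length q = e // k), the quotient/remainder of the rest:
-- q' = q + (1 if r = k-1 else 0), r' = (0 if r = k-1 else r)
lemma qr_back (e k : Int) (he : 0 ≤ e) (hk : 1 < k) :
    PySem.Int.floordiv (e - PySem.Int.floordiv e k) (k - 1)
        = PySem.Int.floordiv e k + (if PySem.Int.mod e k = k - 1 then 1 else 0)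
    ∧ PySem.Int.mod (e - PySem.Int.floordiv e k) (k - 1)
        = (if PySem.Int.mod e k = k - 1 then 0 else PySem.Int.mod e k) := by
  have hrep := PySem.Int.floordiv_mul_add_mod e k
  have hb := mod_bounds e k (by omega)
  have hq : PySem.Int.floordiv (e - PySem.Int.floordiv e k) (k - 1)
      = PySem.Int.floordiv e k + (if PySem.Int.mod e k = k - 1 then 1 else 0) := by
    rw [PySem.Int.floordiv_eq_iff_of_pos (by omega)]
    split_ifs with h
    · constructor <;> nlinarith
    · have h2 : PySem.Int.mod e k ≤ k - 2 := by omega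
      constructor <;> nlinarith
  refine ⟨hq, ?_⟩
  have hrep' := PySem.Int.floordiv_mul_add_mod (e - PySem.Int.floordiv e k) (k - 1)
  rw [hq] at hrep'
  split_ifs at hrep' ⊢ <;> nlinarith

-- B's loop produces the closed-form parts of the prefix of length e, backwards
lemma loopB_eq_map : ∀ (m : Nat) (cs : List Char) (e k : Int) (acc : List String),
    k.toNat = m → 0 ≤ e →
    loopB cs e k acc
      = acc ++ ((PySem.List.pyRange 0 k 1).map
          (partC cs (PySem.Int.floordiv e k) (PySem.Int.mod e k))).reverse := by
  intro m
  induction m with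
  | zero =>
      intro cs e k acc h he
      rw [loopB, if_pos (by omega), PySem.List.pyRange_one_eq_nil (by omega)]
      simp
  | succ m ih =>
      intro cs e k acc h he
      have hk : 0 < k := by omega
      rw [loopB, if_neg (by omega)]
      set q : Int := PySem.Int.floordiv e k with hqdef
      set r : Int := PySem.Int.mod e k with hrdef
      have hb := mod_bounds e k hk
      rw [← hrdef] at hb
      have hq0 : 0 ≤ q := fdiv_nonneg' e k he hk
      have hrep := PySem.Int.floordiv_mul_add_mod e k
      rw [← hqdef, ← hrdef] at hrep
      have hqe : q ≤ e := by nlinarith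
      rw [ih cs (e - q) (k - 1) _ (by omega) (by omega)]
      have hsplit : PySem.List.pyRange 0 k 1 = PySem.List.pyRange 0 (k-1) 1 ++ [k-1] := by
        have hs := PySem.List.pyRange_one_succ_right (a := 0) (b := k - 1) (by omega)
        rwa [sub_add_cancel] at hs
      rw [hsplit, List.map_append, List.reverse_append]
      have hlast : String.ofList (PySem.List.slice cs (some (e - q)) (some e))
          = partC cs q r (k - 1) := by
        unfold partC
        have h1 : (k - 1) * q + min (k - 1) r = e - q := by
          have : min (k - 1) r = r := by omega
          rw [this]; nlinarith
        have h2 : (k - 1 + 1) * q + min (k - 1 + 1) r = e := by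
          have : min (k - 1 + 1) r = r := by omega
          rw [this]; nlinarith
        rw [h1, h2]
      rcases lt_or_ge (k - 1) 1 with hk1 | hk1
      · rw [PySem.List.pyRange_one_eq_nil (by omega)]
        simp [hlast]
      · have hqr := qr_back e k he (by omega)
        rw [← hqdef, ← hrdef] at hqr
        rw [hqr.1, hqr.2]
        have hmaps : (PySem.List.pyRange 0 (k - 1) 1).map
              (partC cs (q + if r = k - 1 then 1 else 0) (if r = k - 1 then 0 else r))
            = (PySem.List.pyRange 0 (k - 1) 1).map (partC cs q r) := by
          apply List.map_congr_left
          intro i hi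
          obtain ⟨hi0, hi1⟩ := PySem.List.mem_pyRange_one.mp hi
          unfold partC
          have b1 : i * (q + if r = k - 1 then 1 else 0) + min i (if r = k - 1 then 0 else r)
              = i * q + min i r := by
            split_ifs with hcase
            · rw [min_eq_right hi0, min_eq_left (by omega : i ≤ r)]
              ring
            · ring_nf
          have b2 : (i + 1) * (q + if r = k - 1 then 1 else 0) + min (i + 1) (if r = k - 1 then 0 else r)
              = (i + 1) * q + min (i + 1) r := by
            split_ifs with hcase
            · rw [min_eq_right (by omega : (0:Int) ≤ i + 1), min_eq_left (by omega : i + 1 ≤ r)]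
              ring
            · ring_nf
          rw [b1, b2]
        rw [hmaps]
        simp [hlast]

-- A's loop invariant: entering iteration j with start_index = j*q + min j r,
-- the rest of the fold appends exactly the closed-form parts.
lemma foldA_eq_map (cs : List Char) (q r : Int) :
    ∀ (m : Nat) (j k : Int) (acc : List String), (k - j).toNat = m →
      ((PySem.List.pyRange j k 1).foldl (stepA cs q r) (acc, j * q + min j r)).1
        = acc ++ (PySem.List.pyRange j k 1).map (partC cs q r) := by
  intro m
  induction m with
  | zero =>
      intro j k acc h
      rw [PySem.List.pyRange_one_eq_nil (by omega)]
      simp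
  | succ m ih =>
      intro j k acc h
      rw [PySem.List.pyRange_one_cons (by omega)]
      have he : j * q + min j r + q + (if j < r then 1 else 0)
          = (j + 1) * q + min (j + 1) r := by
        rcases lt_or_ge j r with hjr | hjr
        · simp only [if_pos hjr, min_eq_left hjr.le, min_eq_left (by omega : j + 1 ≤ r)]
          ring
        · simp only [if_neg (not_lt.mpr hjr), min_eq_right hjr, min_eq_right (by omega : r ≤ j + 1)]
          ring
      have hstep : stepA cs q r (acc, j * q + min j r) j
          = (acc ++ [partC cs q r j], (j + 1) * q + min (j + 1) r) := by
        simp only [stepA, partC, he]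
      simp only [List.foldl_cons, hstep]
      rw [ih (j + 1) k (acc ++ [partC cs q r j]) (by omega)]
      simp [List.map_cons]

-- ===== VERDICT (by name: the statement is the Claim_ definition above) =====
theorem divide_string_into_5_spec : Claim_equal_divide_string_into_5 := by
  intro s a _ hpre
  unfold Spec_divide_string_into_5 divide_string_into_5 divide_string_into_5_alt
  simp only []
  set n : Int := PySem.Str.len s with hn
  set k : Int := if n < a then 1 else a with hk
  have hn0 : 0 ≤ n := by simp [hn, PySem.Str.len_eq]
  rcases lt_or_ge 0 k with hkpos | hkle
  · have hr0 : (0 : Int) = 0 * PySem.Int.floordiv n k + min 0 (PySem.Int.mod n k) := by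
      have := (mod_bounds n k hkpos).1
      omega
    have key := foldA_eq_map s.toList (PySem.Int.floordiv n k) (PySem.Int.mod n k) k.toNat 0 k [] (by omega)
    rw [← hr0] at key
    rw [key, loopB_eq_map k.toNat s.toList n k [] rfl hn0]
    simp
  · have hkneg : k < 0 := by
      rcases lt_or_ge n a with h | h
      · simp [hk, if_pos h] at hkle
      · have : k = a := by simp [hk, not_lt.mpr h]
        rcases lt_trichotomy a 0 with h1 | h1 | h1
        · omega
        · exact absurd h1 hpre
        · omega
    rw [PySem.List.pyRange_one_eq_nil (by omega), loopB, if_pos (by omega)]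
    simp
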